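-- pv_equiv track=rewrite | github.com/TimHedden/AI_Prototyping_Course | Project3_FinanceGuru_(Group)/app_FinanceGuru.py | get_category_colors
-- ===== SOURCE A (Python) =====
-- def get_category_colors(categories):
--     # Define the base color palette with red, yellow, orange, and purple shades
--     base_palette = ['rgba(28, 150, 210, 0.8)', '#EF9A9A', '#FFD700', '#FFA500',
--                     '#E57373', '#EF5350', '#9C27B0', '#F44336', '#E53935', '#D32F2F', 'grey']
--     # Ensure the palette is large enough for the categories by repeating it
--     extended_palette = base_palette * ((len(categories) + len(base_palette) - 1) // len(base_palette))
--     # Insert green as the second color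
--     extended_palette.insert(1, 'green')
--     # Slice the palette to match the number of categories
--     final_palette = extended_palette[:len(categories)]
--     color_map = {category: color for category, color in zip(categories, final_palette)}
--     return [color_map.get(category, 'grey') for category in categories]
-- ===== SOURCE B (Python) =====
-- def get_category_colors(categories):
--     base_palette = ['rgba(28, 150, 210, 0.8)', '#EF9A9A', '#FFD700', '#FFA500',
--                     '#E57373', '#EF5350', '#9C27B0', '#F44336', '#E53935', '#D32F2F', 'grey']
--     color_map = {}
--     for i, category in enumerate(categories):
--         if i == 0:
--             color = base_palette[0]
--         elif i == 1:
--             color = 'green'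
--         else:
--             color = base_palette[(i - 1) % len(base_palette)]
--         color_map[category] = color
--     return [color_map[c] for c in categories]
-- ===== Notes on version B (the rewrite author's own statement) =====
-- stated objective: simpler
-- what changed: Replaces A's build-a-repeated-palette / insert-green / slice / zip-into-dict pipeline by a single enumerate loop that computes each color directly from its index (i==0 -> base[0], i==1 -> 'green', else base[(i-1) % 11]) and records it in a dict, then reads the colors back.
import Mathlib
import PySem

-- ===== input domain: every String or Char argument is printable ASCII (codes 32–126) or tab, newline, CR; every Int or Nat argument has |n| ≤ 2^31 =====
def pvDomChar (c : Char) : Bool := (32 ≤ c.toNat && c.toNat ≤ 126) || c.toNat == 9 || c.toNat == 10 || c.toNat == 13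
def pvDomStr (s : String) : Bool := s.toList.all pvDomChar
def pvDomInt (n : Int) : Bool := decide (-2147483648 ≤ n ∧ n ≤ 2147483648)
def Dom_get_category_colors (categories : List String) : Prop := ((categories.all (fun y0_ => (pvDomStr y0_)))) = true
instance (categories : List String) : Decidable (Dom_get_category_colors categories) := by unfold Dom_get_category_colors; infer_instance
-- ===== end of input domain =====

-- B replaces A's list-multiplication / insert / slice / zip pipeline by a single pass that
-- computes each color directly from its index and records it in a dict (objective: simpler).

-- the base palette literal shared by both Python sources
def gccB : List String := ["rgba(28, 150, 210, 0.8)", "#EF9A9A", "#FFD700", "#FFA500",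
    "#E57373", "#EF5350", "#9C27B0", "#F44336", "#E53935", "#D32F2F", "grey"]

-- ===== PORT A =====
def get_category_colors (categories : List String) : List String :=
  let base_palette : List String := gccB
  let extended_palette := PySem.List.insert
    (PySem.List.pyRepeat base_palette
      (PySem.Int.floordiv ((categories.length : Int) + (base_palette.length : Int) - 1) (base_palette.length : Int)))
    1 "green"
  let final_palette := PySem.List.slice extended_palette none (some (categories.length : Int))
  let color_map : PySem.Dict String String :=
    (categories.zip final_palette).foldl (fun d p => d.insert p.1 p.2) PySem.Dict.empty
  categories.map (fun c => color_map.getD c "grey")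

-- ===== PORT B =====
-- the if/elif/else of Source B's loop body
def gccColor (base_palette : List String) (i : Int) : String :=
  if i = 0 then PySem.List.pyGetD base_palette 0 ""
  else if i = 1 then "green"
  else PySem.List.pyGetD base_palette (PySem.Int.mod (i - 1) (base_palette.length : Int)) ""

def get_category_colors_alt (categories : List String) : List String :=
  let base_palette : List String := gccB
  let color_map : PySem.Dict String String :=
    (PySem.List.enumerate categories).foldl
      (fun d p => d.insert p.2 (gccColor base_palette p.1)) PySem.Dict.empty
  -- color_map[c]: every c ∈ categories is a key of color_map, so the KeyError default "" never fires
  categories.map (fun c => (color_map.get? c).getD "")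

-- ===== PRECONDITION & SPEC =====
def Spec_get_category_colors (categories : List String) (out : List String) : Prop := out = get_category_colors_alt categories
instance (categories : List String) (out : List String) : Decidable (Spec_get_category_colors categories out) := by unfold Spec_get_category_colors; infer_instance

-- ===== CLAIM (what is proved, stated in full; the proofs are below) =====
def Claim_equal_get_category_colors : Prop := ∀ (categories : List String), Dom_get_category_colors categories → Spec_get_category_colors categories (get_category_colors categories)

-- ===== LEMMAS AND PROOFS =====

-- A's intermediate values, named for the proofs: k = ceil(n/11), rep = base*k, ext = rep with
-- "green" inserted at 1, fin = ext[:n]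
def gccK (n : Nat) : Nat := (n + 10) / 11
def gccRep (n : Nat) : List String := (List.replicate (gccK n) gccB).flatten
def gccExt (n : Nat) : List String := PySem.List.insert (gccRep n) 1 "green"
def gccFin (n : Nat) : List String := PySem.List.slice (gccExt n) none (some (n : Int))

-- repeated-list indexing: (xs * k)[j] = xs[j % len(xs)]
theorem gcc_rep_getElem? {α : Type} (xs : List α) (k j : Nat) (h : j < xs.length * k) :
    ((List.replicate k xs).flatten)[j]? = xs[j % xs.length]? := by
  induction k generalizing j with
  | zero => simp at h
  | succ k ih =>
    rw [Nat.mul_succ] at h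
    rw [List.replicate_succ, List.flatten_cons]
    by_cases hj : j < xs.length
    · rw [List.getElem?_append_left hj, Nat.mod_eq_of_lt hj]
    · have h2 : j - xs.length < xs.length * k := by omega
      rw [List.getElem?_append_right (by omega), ih _ h2]
      conv_rhs => rw [Nat.mod_eq_sub_mod (show xs.length ≤ j by omega)]

theorem gcc_len_rep (n : Nat) : (gccRep n).length = 11 * gccK n := by
  simp [gccRep, gccB, Nat.mul_comm]

theorem gcc_n_le (n : Nat) : n ≤ 11 * gccK n := by
  unfold gccK; omega

theorem gcc_ext_eq (n : Nat) (hn : 0 < n) :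
    gccExt n = (gccRep n).take 1 ++ "green" :: (gccRep n).drop 1 := by
  have h1 : 1 ≤ (gccRep n).length := by
    have := gcc_len_rep n; have := gcc_n_le n; omega
  exact PySem.List.insert_ofNat (gccRep n) 1 "green" h1

-- the heart of the equivalence: A's sliced palette, read at index j, is B's direct formula
theorem gcc_fin_getElem? (n j : Nat) (hj : j < n) :
    (gccFin n)[j]? = some (gccColor gccB (j : Int)) := by
  have hrep : (gccRep n).length = 11 * gccK n := gcc_len_rep n
  have hle : n ≤ 11 * gccK n := gcc_n_le n
  have hfin : (gccFin n) = (gccExt n).take n := by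
    simp [gccFin, PySem.List.slice_to_natCast]
  rw [hfin, List.getElem?_take_of_lt hj, gcc_ext_eq n (by omega)]
  have htake : ((gccRep n).take 1).length = 1 := by simp; omega
  have hrj : ∀ m : Nat, m < 11 * gccK n → (gccRep n)[m]? = gccB[m % 11]? := by
    intro m hm
    have : gccB.length = 11 := by simp [gccB]
    unfold gccRep
    rw [gcc_rep_getElem? gccB (gccK n) m (by rw [this]; omega), this]
  match j, hj with
  | 0, _ =>
    rw [List.getElem?_append_left (by omega)]
    have : ((gccRep n).take 1)[0]? = (gccRep n)[0]? := List.getElem?_take_of_lt (by omega)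
    rw [this, hrj 0 (by omega)]
    simp [gccColor, gccB]
  | 1, _ =>
    rw [List.getElem?_append_right (by omega)]
    simp [htake, gccColor]
  | (j+2), hj =>
    rw [List.getElem?_append_right (by omega)]
    rw [htake]
    have e3 : j + 2 - 1 = j + 1 := by omega
    rw [e3, List.getElem?_cons_succ, List.getElem?_drop]
    have e0 : 1 + j = j + 1 := Nat.add_comm 1 j
    rw [e0, hrj (j + 1) (by omega)]
    have hc : gccColor gccB ((j + 2 : Nat) : Int)
        = PySem.List.pyGetD gccB (PySem.Int.mod (((j + 1 : Nat) : Int)) ((11 : Nat) : Int)) "" := by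
      have e1 : ((j + 2 : Nat) : Int) - 1 = ((j + 1 : Nat) : Int) := by push_cast; ring
      have e2 : (gccB.length : Int) = ((11 : Nat) : Int) := by simp [gccB]
      unfold gccColor
      rw [if_neg (by omega), if_neg (by omega), e1, e2]
    rw [hc, PySem.Int.mod_natCast, PySem.List.pyGetD_natCast]
    have hlt : (j + 1) % 11 < gccB.length := by simp [gccB]; omega
    rw [List.getD_eq_getElem _ _ hlt, List.getElem?_eq_getElem hlt]

theorem gcc_fin_length (n : Nat) : (gccFin n).length = n := by
  have hrep := gcc_len_rep n
  have hle := gcc_n_le n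
  by_cases hn : 0 < n
  · have : (gccExt n).length = 11 * gccK n + 1 := by
      rw [gcc_ext_eq n hn]; simp; omega
    simp [gccFin, PySem.List.slice_to_natCast, this]; omega
  · have hn0 : n = 0 := by omega
    subst hn0
    have : PySem.List.slice (gccExt 0) none (some ((0 : Nat) : Int)) = (gccExt 0).take 0 :=
      PySem.List.slice_to_natCast (gccExt 0) 0
    simp [gccFin]
    simpa using this

-- zip(categories, final_palette) is enumerate(categories) with the color computed from the index
theorem gcc_zip_eq (categories : List String) :
    categories.zip (gccFin categories.length)
      = (PySem.List.enumerate categories).map (fun p => (p.2, gccColor gccB p.1)) := by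
  apply List.ext_getElem
  · simp [gcc_fin_length, PySem.List.length_enumerate]
  · intro i h1 h2
    have hi : i < categories.length := by
      simp [gcc_fin_length] at h1; omega
    have hif : i < (gccFin categories.length).length := by rw [gcc_fin_length]; exact hi
    rw [List.getElem_zip, List.getElem_map, PySem.List.getElem_enumerate]
    have : (gccFin categories.length)[i] = gccColor gccB (i : Int) := by
      have := gcc_fin_getElem? categories.length i hi
      rwa [List.getElem?_eq_getElem (by rw [gcc_fin_length]; exact hi), Option.some_inj] at this
    rw [this]
    simp

-- every category is a key of B's dict (so B's lookup never falls to the KeyError default)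
theorem gcc_keys (categories : List String) :
    ∀ c ∈ categories,
      ((PySem.List.enumerate categories).foldl
        (fun (d : PySem.Dict String String) p => d.insert p.2 (gccColor gccB p.1))
        PySem.Dict.empty).contains c = true := by
  intro c hc
  rw [PySem.Dict.contains_iff_mem_keys]
  rw [PySem.Dict.keys_foldl_insert_key]
  rw [PySem.List.map_snd_enumerate categories 0]
  have hmem : c ∈ PySem.Set.ofList categories := (PySem.Set.mem_ofList categories c).mpr hc
  simpa [PySem.Dict.keys_empty, PySem.Set.update, PySem.Set.ofList_eq_foldl] using hmem

theorem gcc_A_eq (categories : List String) :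
    get_category_colors categories =
      categories.map (fun c => ((categories.zip (gccFin categories.length)).foldl
        (fun (d : PySem.Dict String String) p => d.insert p.1 p.2) PySem.Dict.empty).getD c "grey") := by
  have hrep : PySem.List.pyRepeat gccB
      (PySem.Int.floordiv ((categories.length : Int) + (gccB.length : Int) - 1) (gccB.length : Int))
      = gccRep categories.length := by
    have h1 : (categories.length : Int) + (gccB.length : Int) - 1
        = ((categories.length + 10 : Nat) : Int) := by simp [gccB]; omega
    have h2 : (gccB.length : Int) = ((11 : Nat) : Int) := by simp [gccB]
    rw [h1, h2, PySem.Int.floordiv_natCast]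
    simp only [gccRep, gccK, PySem.List.pyRepeat, Int.toNat_natCast]
  simp only [get_category_colors]
  rw [hrep]
  rfl

theorem gcc_spec_aux (categories : List String) :
    get_category_colors categories = get_category_colors_alt categories := by
  rw [gcc_A_eq, gcc_zip_eq, List.foldl_map]
  simp only [get_category_colors_alt]
  apply List.map_congr_left
  intro c hc
  have hcont := gcc_keys categories c hc
  rw [PySem.Dict.contains_eq_isSome_get?] at hcont
  obtain ⟨v, hv⟩ := Option.isSome_iff_exists.mp hcont
  rw [PySem.Dict.getD_eq_get?_getD, hv]
  rfl

-- ===== VERDICT (by name: the statement is the Claim_ definition above) =====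
theorem get_category_colors_spec : Claim_equal_get_category_colors := by
  intro categories _
  exact gcc_spec_aux categories
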